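-- pv_equiv track=rewrite | github.com/DMOJ/libmemcpy | generate.py | group_functions
-- ===== SOURCE A (Python) =====
-- from collections import defaultdict
--
-- SIGNATURE = {'memmove': 'memcpy', 'mempcpy': 'memcpy'}
--
-- def group_functions(functions):
--     func_group = defaultdict(list)
--     file_group = defaultdict(set)
--
--     for func in functions:
--         group = func.partition('_')[0]
--         func_group[group].append(func)
--         file_group[SIGNATURE.get(group, group)].add(group)
--
--     return func_group, file_group
-- ===== SOURCE B (Python) =====
-- SIGNATURE = {'memmove': 'memcpy', 'mempcpy': 'memcpy'}
--
-- def group_functions(functions):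
--     # Distinct prefixes, in first-occurrence order.
--     prefixes = []
--     for func in functions:
--         group = func.partition('_')[0]
--         if group not in prefixes:
--             prefixes.append(group)
--     # Each bucket is a filter of the input rather than an accumulated dict value.
--     func_group = {g: [f for f in functions if f.partition('_')[0] == g] for g in prefixes}
--     file_group = {}
--     for g in prefixes:
--         file_group.setdefault(SIGNATURE.get(g, g), set()).add(g)
--     return func_group, file_group
-- ===== Notes on version B (the rewrite author's own statement) =====
-- stated objective: alternative
-- what changed: A accumulates both defaultdicts in one interleaved loop; B never accumulates func_group at all: it collects the distinct prefixes in first-occurrence order, builds func_group as a dict comprehension that filters the input per prefix (nested scans instead of hash accumulation), and derives file_group from the distinct prefixes only.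
import Mathlib
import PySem

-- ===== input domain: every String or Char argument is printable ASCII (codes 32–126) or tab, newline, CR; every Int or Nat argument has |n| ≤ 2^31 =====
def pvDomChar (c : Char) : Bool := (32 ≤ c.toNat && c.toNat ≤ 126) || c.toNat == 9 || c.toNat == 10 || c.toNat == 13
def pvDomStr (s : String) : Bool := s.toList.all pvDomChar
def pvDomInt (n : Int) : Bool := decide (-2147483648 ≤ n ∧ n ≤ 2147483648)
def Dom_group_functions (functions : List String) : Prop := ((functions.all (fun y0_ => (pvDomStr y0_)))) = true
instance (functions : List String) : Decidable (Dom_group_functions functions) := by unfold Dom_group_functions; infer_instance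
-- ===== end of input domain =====

-- B replaces A's interleaved dict accumulation by: collect the distinct prefixes once, build
-- func_group by filtering the input per prefix, derive file_group from the distinct prefixes —
-- objective: alternative decomposition (same return value, no accumulated func_group dict).

-- ===== PORT A =====
-- SIGNATURE = {'memmove': 'memcpy', 'mempcpy': 'memcpy'}
def pvSIGNATURE : PySem.Dict String String :=
  PySem.Dict.ofList [("memmove", "memcpy"), ("mempcpy", "memcpy")]

-- func.partition('_')[0]: the characters before the first '_' (the whole string if there is
-- no '_'); hand port of the [0]-component of str.partition, exact on every string.
def pvPartition0 (s : String) : String := String.ofList (s.toList.takeWhile (fun c => c ≠ '_'))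

def group_functions (functions : List String) :
    (List (String × List String)) × (List (String × List String)) :=
  let st := functions.foldl
    (fun (st : PySem.Dict String (List String) × PySem.Dict String (PySem.Set String)) func =>
      let group := pvPartition0 func
      (st.1.modify group [] (fun l => l ++ [func]),
       st.2.modify (pvSIGNATURE.getD group group) [] (fun s => s.add group)))
    (PySem.Dict.empty, PySem.Dict.empty)
  (st.1.items, st.2.items)

-- ===== PORT B =====
def group_functions_alt (functions : List String) :
    (List (String × List String)) × (List (String × List String)) :=
  -- prefixes: 'if group not in prefixes: prefixes.append(group)' is exactly PySem.Set.add
  let prefixes : PySem.Set String :=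
    functions.foldl (fun acc func => PySem.Set.add acc (pvPartition0 func)) []
  -- dict comprehension: one filter of the input per distinct prefix
  let func_group := prefixes.map
    (fun g => (g, functions.filter (fun f => pvPartition0 f = g)))
  -- file_group via setdefault over the distinct prefixes
  let file_group := prefixes.foldl
    (fun (d : PySem.Dict String (PySem.Set String)) g =>
      d.modify (pvSIGNATURE.getD g g) [] (fun s => s.add g))
    PySem.Dict.empty
  (func_group, file_group.items)

-- ===== PRECONDITION & SPEC =====
def Spec_group_functions (functions : List String) (out : (List (String × List String)) × (List (String × List String))) : Prop := out = group_functions_alt functions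
instance (functions : List String) (out : (List (String × List String)) × (List (String × List String))) : Decidable (Spec_group_functions functions out) := by unfold Spec_group_functions; infer_instance

-- ===== CLAIM (what is proved, stated in full; the proofs are below) =====
def Claim_equal_group_functions : Prop := ∀ (functions : List String), Dom_group_functions functions → Spec_group_functions functions (group_functions functions)

-- ===== LEMMAS AND PROOFS =====

-- abbreviations used only by the proofs
def pvSig (g : String) : String := pvSIGNATURE.getD g g

def pvStep (d : PySem.Dict String (PySem.Set String)) (g : String) :
    PySem.Dict String (PySem.Set String) :=
  d.modify (pvSig g) [] (fun s => s.add g)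

-- A's paired fold splits into two independent folds
theorem pv_fold_split (functions : List String)
    (d1 : PySem.Dict String (List String)) (d2 : PySem.Dict String (PySem.Set String)) :
    functions.foldl
      (fun st func =>
        (st.1.modify (pvPartition0 func) [] (fun l => l ++ [func]),
         st.2.modify (pvSIGNATURE.getD (pvPartition0 func) (pvPartition0 func)) []
           (fun s => s.add (pvPartition0 func))))
      (d1, d2)
    = (functions.foldl (fun d func => d.modify (pvPartition0 func) [] (fun l => l ++ [func])) d1,
       functions.foldl (fun d func => pvStep d (pvPartition0 func)) d2) := by
  induction functions generalizing d1 d2 with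
  | nil => rfl
  | cons f t ih => simp [List.foldl, pvStep, pvSig, ih]

-- value at any key of A's func-group fold: the functions with that prefix, in order
theorem pv_getD_funcfold (fs : List String) (d : PySem.Dict String (List String)) (k : String) :
    (fs.foldl (fun d f => d.modify (pvPartition0 f) [] (fun l => l ++ [f])) d).getD k []
      = d.getD k [] ++ fs.filter (fun f => pvPartition0 f = k) := by
  induction fs generalizing d with
  | nil => simp
  | cons f t ih =>
    simp only [List.foldl, List.filter]
    by_cases h : pvPartition0 f = k
    · simp [ih, h]
    · simp [ih, PySem.Dict.getD_modify, h, Ne.symm h]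

-- value at any key of the file-group fold: the new groups with that signature, in order
theorem pv_getD_fold (gs : List String) (d : PySem.Dict String (PySem.Set String)) (k : String) :
    (gs.foldl pvStep d).getD k []
      = PySem.Set.update (d.getD k []) (gs.filter (fun g => pvSig g = k)) := by
  induction gs generalizing d with
  | nil => simp [PySem.Set.update_nil]
  | cons g t ih =>
    simp only [List.foldl, List.filter]
    by_cases h : pvSig g = k
    · simp [ih, pvStep, h, PySem.Set.update_cons]
    · simp [ih, pvStep, PySem.Dict.getD_modify, h, Ne.symm h]

-- dedup commutes with filter
theorem pv_filter_ofList (gs : List String) (p : String → Bool) :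
    (PySem.Set.ofList gs).filter p = PySem.Set.ofList (gs.filter p) := by
  induction gs using List.reverseRecOn with
  | nil => rfl
  | append_singleton t x ih =>
    rw [PySem.Set.ofList_append_singleton, List.filter_append]
    by_cases hx : x ∈ t
    · rw [PySem.Set.add_of_mem ((PySem.Set.mem_ofList _ _).mpr hx), ih]
      by_cases hp : p x
      · rw [show List.filter p [x] = [x] by simp [hp], PySem.Set.ofList_append_singleton,
            PySem.Set.add_of_mem ((PySem.Set.mem_ofList _ _).mpr (List.mem_filter.mpr ⟨hx, hp⟩))]
      · rw [show List.filter p [x] = [] by simp [hp], List.append_nil]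
    · rw [PySem.Set.add_of_not_mem (fun hm => hx ((PySem.Set.mem_ofList _ _).mp hm)),
          List.filter_append, ih]
      by_cases hp : p x
      · rw [show List.filter p [x] = [x] by simp [hp], PySem.Set.ofList_append_singleton,
            PySem.Set.add_of_not_mem
              (fun hm => hx (List.mem_filter.mp ((PySem.Set.mem_ofList _ _).mp hm)).1)]
      · rw [show List.filter p [x] = [] by simp [hp], List.append_nil, List.append_nil]

-- dedup commutes with map-then-dedup
theorem pv_ofList_map_ofList (gs : List String) (f : String → String) :
    PySem.Set.ofList ((PySem.Set.ofList gs).map f) = PySem.Set.ofList (gs.map f) := by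
  induction gs using List.reverseRecOn with
  | nil => rfl
  | append_singleton t x ih =>
    rw [PySem.Set.ofList_append_singleton]
    by_cases hx : x ∈ t
    · rw [PySem.Set.add_of_mem ((PySem.Set.mem_ofList _ _).mpr hx), ih, List.map_append,
          List.map_cons, List.map_nil, PySem.Set.ofList_append_singleton,
          PySem.Set.add_of_mem ((PySem.Set.mem_ofList _ _).mpr (List.mem_map.mpr ⟨x, hx, rfl⟩))]
    · rw [PySem.Set.add_of_not_mem (fun hm => hx ((PySem.Set.mem_ofList _ _).mp hm)),
          List.map_append, List.map_append, List.map_cons, List.map_nil,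
          PySem.Set.ofList_append_singleton, PySem.Set.ofList_append_singleton, ih]

-- the file-group fold only depends on the distinct groups
theorem pv_fold_dedup (gs : List String) :
    gs.foldl pvStep PySem.Dict.empty = (PySem.Set.ofList gs).foldl pvStep PySem.Dict.empty := by
  have hkeys : ∀ l : List String,
      (l.foldl pvStep (PySem.Dict.empty : PySem.Dict String (PySem.Set String))).keys
        = PySem.Set.ofList (l.map pvSig) := by
    intro l
    have := PySem.Dict.keys_foldl_modify_key l pvSig ([] : PySem.Set String)
      (fun _ g => fun s => PySem.Set.add s g) PySem.Dict.empty
    simpa [pvStep, PySem.Dict.keys_empty, PySem.Set.update_nil_left] using this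
  have hnodup : ∀ l : List String,
      (l.foldl pvStep (PySem.Dict.empty : PySem.Dict String (PySem.Set String))).keys.Nodup := by
    intro l
    have := PySem.Dict.nodup_keys_foldl_modify_key l pvSig ([] : PySem.Set String)
      (fun _ g => fun s => PySem.Set.add s g) PySem.Dict.empty (by simp [PySem.Dict.keys_empty])
    simpa [pvStep] using this
  apply PySem.Dict.ext
  rw [PySem.Dict.items_eq_map_keys _ (hnodup gs) ([] : PySem.Set String),
      PySem.Dict.items_eq_map_keys _ (hnodup (PySem.Set.ofList gs)) ([] : PySem.Set String)]
  rw [hkeys gs, hkeys (PySem.Set.ofList gs), pv_ofList_map_ofList]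
  apply List.map_congr_left
  intro k _
  rw [pv_getD_fold, pv_getD_fold, PySem.Dict.getD_empty,
      pv_filter_ofList gs (fun g => pvSig g = k), PySem.Set.update_nil_left,
      PySem.Set.update_nil_left, PySem.Set.ofList_ofList]

-- ===== VERDICT (by name: the statement is the Claim_ definition above) =====
theorem group_functions_spec : Claim_equal_group_functions := by
  intro functions _
  show group_functions functions = group_functions_alt functions
  unfold group_functions group_functions_alt
  rw [pv_fold_split]
  -- B's prefixes list is set(groups) in first-occurrence order
  have hpref : functions.foldl (fun acc func => PySem.Set.add acc (pvPartition0 func)) []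
      = PySem.Set.ofList (functions.map pvPartition0) := by
    rw [PySem.Set.ofList_eq_foldl, List.foldl_map]
  have hkeys : (functions.foldl
      (fun (d : PySem.Dict String (List String)) func =>
        d.modify (pvPartition0 func) [] (fun l => l ++ [func])) PySem.Dict.empty).keys
      = PySem.Set.ofList (functions.map pvPartition0) := by
    have := PySem.Dict.keys_foldl_modify_key functions pvPartition0 ([] : List String)
      (fun _ func => fun l => l ++ [func]) (PySem.Dict.empty : PySem.Dict String (List String))
    simpa [PySem.Dict.keys_empty, PySem.Set.update_nil_left] using this
  have hnodup : (functions.foldl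
      (fun (d : PySem.Dict String (List String)) func =>
        d.modify (pvPartition0 func) [] (fun l => l ++ [func])) PySem.Dict.empty).keys.Nodup := by
    have := PySem.Dict.nodup_keys_foldl_modify_key functions pvPartition0 ([] : List String)
      (fun _ func => fun l => l ++ [func])
      (PySem.Dict.empty : PySem.Dict String (List String)) (by simp [PySem.Dict.keys_empty])
    simpa using this
  rw [Prod.mk.injEq]
  constructor
  · -- func_group: A's items = one filter per distinct prefix
    rw [PySem.Dict.items_eq_map_keys _ hnodup ([] : List String), hkeys, hpref]
    apply List.map_congr_left
    intro k _
    rw [pv_getD_funcfold, PySem.Dict.getD_empty]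
    rfl
  · -- file_group: A's fold over all groups = B's fold over the distinct prefixes
    rw [hpref]
    have h2 := pv_fold_dedup (functions.map pvPartition0)
    rw [List.foldl_map] at h2
    rw [h2]
    rfl
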